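-- pv_equiv track=rewrite | github.com/qhdgkdbs/codingTest | thisIsCodingTest/04 구현/clockCount.py | clock_count
-- ===== SOURCE A (Python) =====
-- def clock_count(n):
--     time_sec = list(range(0, 60))
--
--     count = 0
--
--     for time in time_sec:
--         for sec in time_sec:
--             if '3' in str(time) or '3' in str(sec):
--                 count += 1
--     # 싸이클 한번에 1575
--
--     if n < 3:
--         count *= (n + 1)
--     elif n < 13:
--         count *= n
--         count += 3600
--     elif n < 23:
--         count *= (n - 1)
--         count += 3600 * 2
--     else:
--         count *= (n - 2)
--         count += 3600 * 3
--
--     return count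
-- ===== SOURCE B (Python) =====
-- def clock_count(n):
--     # Complement counting: hours without '3' contribute only sec/min pairs lacking '3'.
--     no3 = sum(1 for x in range(60) if '3' not in str(x))
--     with3 = 3600 - no3 * no3
--     special = sum(1 for h in (3, 13, 23) if h <= n)
--     return with3 * (n + 1) + no3 * no3 * special
-- ===== Notes on version B (the rewrite author's own statement) =====
-- stated objective: simpler
-- what changed: Replaces the 60x60 nested enumeration and the four-branch if/elif ladder by complement counting over one range(60) pass plus a single closed formula with3*(n+1) + no3^2*special.
import Mathlib
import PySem

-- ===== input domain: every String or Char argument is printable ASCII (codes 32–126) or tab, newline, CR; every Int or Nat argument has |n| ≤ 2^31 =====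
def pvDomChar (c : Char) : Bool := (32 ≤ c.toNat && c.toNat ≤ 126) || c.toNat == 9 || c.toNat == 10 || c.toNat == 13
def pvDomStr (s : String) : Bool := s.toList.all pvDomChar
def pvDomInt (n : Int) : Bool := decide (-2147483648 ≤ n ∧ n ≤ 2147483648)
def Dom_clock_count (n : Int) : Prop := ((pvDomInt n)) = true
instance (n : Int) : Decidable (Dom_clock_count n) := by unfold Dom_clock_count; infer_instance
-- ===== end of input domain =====

-- B replaces the 60×60 enumeration and four-branch ladder by complement counting
-- over one range(60) pass and a single closed formula (objective: simpler).

-- ===== PORT A =====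
def clock_count (n : Int) : Int :=
  let time_sec := PySem.List.pyRange 0 60 1
  let count : Int := time_sec.foldl (fun c time =>
    time_sec.foldl (fun c sec =>
      if PySem.Str.isIn "3" (PySem.Int.toStr time) || PySem.Str.isIn "3" (PySem.Int.toStr sec)
      then c + 1 else c) c) 0
  if n < 3 then count * (n + 1)
  else if n < 13 then count * n + 3600
  else if n < 23 then count * (n - 1) + 3600 * 2
  else count * (n - 2) + 3600 * 3

-- ===== PORT B =====
def clock_count_alt (n : Int) : Int :=
  let no3 : Int :=
    ((PySem.List.pyRange 0 60 1).filter
      (fun x => !(PySem.Str.isIn "3" (PySem.Int.toStr x)))).length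
  let with3 := 3600 - no3 * no3
  let special : Int := (([3, 13, 23] : List Int).filter (fun h => decide (h ≤ n))).length
  with3 * (n + 1) + no3 * no3 * special

-- ===== PRECONDITION & SPEC =====
def Spec_clock_count (n : Int) (out : Int) : Prop := out = clock_count_alt n
instance (n : Int) (out : Int) : Decidable (Spec_clock_count n out) := by unfold Spec_clock_count; infer_instance

-- ===== CLAIM (what is proved, stated in full; the proofs are below) =====
def Claim_equal_clock_count : Prop := ∀ (n : Int), Dom_clock_count n → Spec_clock_count n (clock_count n)

-- ===== LEMMAS AND PROOFS =====

set_option maxRecDepth 100000 in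
lemma cycleCount_eq :
    (PySem.List.pyRange 0 60 1).foldl (fun c t => (PySem.List.pyRange 0 60 1).foldl (fun c s =>
       if PySem.Str.isIn "3" (PySem.Int.toStr t) || PySem.Str.isIn "3" (PySem.Int.toStr s)
       then c + 1 else c) c) (0 : Int) = 1575 := by rfl

set_option maxRecDepth 100000 in
lemma no3_eq :
    (((PySem.List.pyRange 0 60 1).filter
      (fun x => !(PySem.Str.isIn "3" (PySem.Int.toStr x)))).length : Int) = 45 := by rfl

-- ===== VERDICT (by name: the statement is the Claim_ definition above) =====
theorem clock_count_spec : Claim_equal_clock_count := by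
  intro n _
  show clock_count n = clock_count_alt n
  simp only [clock_count, clock_count_alt]
  rw [cycleCount_eq, no3_eq]
  by_cases h3 : n < 3
  · simp [List.filter, show ¬((3:Int) ≤ n) by omega, show ¬((13:Int) ≤ n) by omega,
      show ¬((23:Int) ≤ n) by omega, h3]
  · by_cases h13 : n < 13
    · simp [List.filter, show (3:Int) ≤ n by omega, show ¬((13:Int) ≤ n) by omega,
        show ¬((23:Int) ≤ n) by omega, h3, h13]
      ring
    · by_cases h23 : n < 23
      · simp [List.filter, show (3:Int) ≤ n by omega, show (13:Int) ≤ n by omega,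
          show ¬((23:Int) ≤ n) by omega, h3, h13, h23]
        ring
      · simp [List.filter, show (3:Int) ≤ n by omega, show (13:Int) ≤ n by omega,
          show (23:Int) ≤ n by omega, h3, h13, h23]
        ring
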